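-- pv_equiv track=rewrite | github.com/chaekeun/algorithm-study | 프로그래머스/2/42587. 프로세스/프로세스.py | solution
-- ===== SOURCE A (Python) =====
-- def solution(priorities, location):
--
--     q = [[_idx, _prior] for _idx, _prior in enumerate(priorities)]
--     result = []
--     answer = 0
--
--     while q:
--         flag = True
--         idx, prior = q.pop(0)
--         for elem in q:
--             if elem[1] > prior:
--                 q.append([idx, prior])
--                 flag = False
--                 break
--         if flag:
--             result.append(idx)
--
--     for i in range(len(result)):
--         if location == result[i]:
--             answer = i+1
--     return answer
-- ===== SOURCE B (Python) =====
-- def solution(priorities, location):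
--     order = []
--     start = 0
--     for v in sorted(set(priorities), reverse=True):
--         group = [i for i, p in enumerate(priorities) if p == v]
--         wrapped = [i for i in group if i >= start] + [i for i in group if i < start]
--         order += wrapped
--         start = wrapped[-1] + 1
--     for i, idx in enumerate(order):
--         if idx == location:
--             return i + 1
--     return 0
-- ===== Notes on version B (the rewrite author's own statement) =====
-- stated objective: faster
-- what changed: A simulates the whole queue (pop front, scan the rest for a higher priority, rotate or emit) in O(n^2); B never simulates: it makes one pass over the distinct priorities in descending order, emitting each priority group in cyclic index order from a running start pointer, then reads off the location's rank.
import Mathlib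
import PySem

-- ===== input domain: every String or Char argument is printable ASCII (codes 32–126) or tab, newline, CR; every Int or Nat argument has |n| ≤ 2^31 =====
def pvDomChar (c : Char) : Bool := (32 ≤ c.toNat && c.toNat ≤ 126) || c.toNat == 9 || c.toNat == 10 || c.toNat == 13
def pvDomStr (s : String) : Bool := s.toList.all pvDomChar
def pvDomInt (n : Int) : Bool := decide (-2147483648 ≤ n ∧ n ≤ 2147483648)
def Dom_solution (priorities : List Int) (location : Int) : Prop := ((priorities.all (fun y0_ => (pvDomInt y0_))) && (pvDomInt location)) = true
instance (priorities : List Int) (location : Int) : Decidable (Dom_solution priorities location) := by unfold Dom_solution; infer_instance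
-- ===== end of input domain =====

-- B replaces A's O(n^2) queue-rotation simulation by one descending-priority pass
-- (count/emit each priority group in cyclic index order); same return value on all inputs.

-- ===== PORT A =====
-- helper predicate/measure used only for the termination of the while-loop port
def pvIsTop (q : List (Int × Int)) (e : Int × Int) : Bool := q.all (fun f => decide (f.2 ≤ e.2))
def pvFirstMaxPos (q : List (Int × Int)) : Nat := q.findIdx (pvIsTop q)
def pvMeasure (q : List (Int × Int)) : Nat := q.length * q.length + pvFirstMaxPos q

theorem pv_exists_argmax (t : List (Int × Int)) (y : Int × Int) :
    ∃ m ∈ y :: t, ∀ f ∈ y :: t, f.2 ≤ m.2 := by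
  induction t generalizing y with
  | nil => exact ⟨y, by simp⟩
  | cons z t ih =>
    rcases ih (if y.2 ≤ z.2 then z else y) with ⟨m, hm, hmax⟩
    refine ⟨m, ?_, ?_⟩
    · rcases List.mem_cons.1 hm with h | h
      · by_cases hyz : y.2 ≤ z.2 <;> simp [hyz] at h <;> simp [h]
      · simp [List.mem_cons, h]
    · intro f hf
      rcases List.mem_cons.1 hf with rfl | hf
      · have := hmax _ (List.mem_cons_self ..)
        by_cases hyz : f.2 ≤ z.2 <;> simp [hyz] at this <;> omega
      · rcases List.mem_cons.1 hf with rfl | hf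
        · have := hmax _ (List.mem_cons_self ..)
          by_cases hyz : y.2 ≤ f.2 <;> simp [hyz] at this <;> omega
        · exact hmax _ (List.mem_cons_of_mem _ hf)

theorem pvMeasure_pop (x : Int × Int) (rest : List (Int × Int)) :
    pvMeasure rest < pvMeasure (x :: rest) := by
  have h1 : pvFirstMaxPos rest ≤ rest.length := List.findIdx_le_length
  unfold pvMeasure
  simp only [List.length_cons]
  nlinarith [h1]

theorem pvMeasure_rot (idx prior : Int) (rest : List (Int × Int))
    (h : rest.any (fun e => decide (prior < e.2)) = true) :
    pvMeasure (rest ++ [(idx, prior)]) < pvMeasure ((idx, prior) :: rest) := by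
  obtain ⟨e, he, hpe⟩ := List.any_eq_true.1 h
  have hpe' : prior < e.2 := of_decide_eq_true hpe
  have hfun : pvIsTop (rest ++ [(idx, prior)]) = pvIsTop ((idx, prior) :: rest) := by
    funext f
    simp [pvIsTop, List.all_append, List.all_cons, Bool.and_comm]
  have hx : pvIsTop ((idx, prior) :: rest) (idx, prior) = false := by
    rw [Bool.eq_false_iff]
    intro hall
    rw [pvIsTop, List.all_eq_true] at hall
    have := hall e (List.mem_cons_of_mem _ he)
    simp at this; omega
  obtain ⟨m, hmq, hmax⟩ := pv_exists_argmax rest (idx, prior)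
  have hmt : pvIsTop ((idx, prior) :: rest) m = true := by
    simp only [pvIsTop, List.all_eq_true, decide_eq_true_iff]
    exact hmax
  have hmrest : m ∈ rest := by
    rcases List.mem_cons.1 hmq with rfl | hm
    · rw [hx] at hmt; cases hmt
    · exact hm
  have hlt : List.findIdx (pvIsTop ((idx, prior) :: rest)) rest < rest.length :=
    List.findIdx_lt_length_of_exists ⟨m, hmrest, hmt⟩
  have h1 : pvFirstMaxPos (rest ++ [(idx, prior)]) =
      List.findIdx (pvIsTop ((idx, prior) :: rest)) rest := by
    unfold pvFirstMaxPos
    rw [hfun, List.findIdx_append, if_pos hlt]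
  have h2 : pvFirstMaxPos ((idx, prior) :: rest) =
      List.findIdx (pvIsTop ((idx, prior) :: rest)) rest + 1 := by
    unfold pvFirstMaxPos
    rw [List.findIdx_cons, hx]; rfl
  have hL : (rest ++ [(idx, prior)]).length = ((idx, prior) :: rest).length := by simp
  unfold pvMeasure
  rw [h1, h2, hL]
  omega

def asimLoop (q : List (Int × Int)) (result : List Int) : List Int :=
  match q with
  | [] => result
  | (idx, prior) :: rest =>
    if h : rest.any (fun e => decide (prior < e.2)) then
      asimLoop (rest ++ [(idx, prior)]) result
    else
      asimLoop rest (result ++ [idx])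
termination_by pvMeasure q
decreasing_by
· exact pvMeasure_rot idx prior rest h
· exact pvMeasure_pop _ rest

def solution (priorities : List Int) (location : Int) : Int :=
  let q := PySem.List.enumerate priorities
  let result := asimLoop q []
  (PySem.List.pyRange 0 (result.length) 1).foldl
    (fun answer i => if location = PySem.List.pyGetD result i 0 then i + 1 else answer) 0

-- ===== PORT B =====
def bStep (priorities : List Int) (acc : List Int × Int) (v : Int) : List Int × Int :=
  let group := ((PySem.List.enumerate priorities).filter (fun ip => ip.2 == v)).map (fun ip => ip.1)
  let wrapped := group.filter (fun i => decide (acc.2 ≤ i)) ++ group.filter (fun i => decide (i < acc.2))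
  (acc.1 ++ wrapped, PySem.List.pyGetD wrapped (-1) 0 + 1)

def bFind (location : Int) (l : List Int) (i : Int) : Int :=
  match l with
  | [] => 0
  | idx :: t => if idx = location then i + 1 else bFind location t (i + 1)

def solution_alt (priorities : List Int) (location : Int) : Int :=
  let vs := PySem.List.sorted (PySem.Set.ofList priorities) (fun x => x) true
  let order := (vs.foldl (bStep priorities) ([], 0)).1
  bFind location order 0

-- ===== PRECONDITION & SPEC =====
def Spec_solution (priorities : List Int) (location : Int) (out : Int) : Prop := out = solution_alt priorities location
instance (priorities : List Int) (location : Int) (out : Int) : Decidable (Spec_solution priorities location out) := by unfold Spec_solution; infer_instance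

-- ===== CLAIM (what is proved, stated in full; the proofs are below) =====
def Claim_equal_solution : Prop := ∀ (priorities : List Int) (location : Int), Dom_solution priorities location → Spec_solution priorities location (solution priorities location)

-- ===== LEMMAS AND PROOFS =====

-- proof-side machinery: the "cyclic print order" cpoQ, and queue/level geometry

def qmaxL : List (Int × Int) → Int
  | [] => 0
  | y :: t => t.foldl (fun acc e => max acc e.2) y.2

def cpoQ (q : List (Int × Int)) : List Int :=
  match h : q.dropWhile (fun e => decide (e.2 < qmaxL q)) with
  | [] => []
  | x :: b => x.1 :: cpoQ (b ++ q.takeWhile (fun e => decide (e.2 < qmaxL q)))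
termination_by q.length
decreasing_by
  have h2 := congrArg List.length
    (List.takeWhile_append_dropWhile (p := fun e => decide (e.2 < qmaxL q)) (l := q))
  rw [h] at h2
  simp only [List.length_append, List.length_cons] at h2 ⊢
  omega

def rotQ (S : List (Int × Int)) (s : Int) : List (Int × Int) :=
  S.filter (fun e => decide (s ≤ e.1)) ++ S.filter (fun e => decide (e.1 < s))

def sidx (S : List (Int × Int)) : Prop := S.Pairwise (fun e f => e.1 < f.1)

def gfil (S : List (Int × Int)) (m : Int) : List (Int × Int) := S.filter (fun e => e.2 == m)

def wPairs (S : List (Int × Int)) (m s : Int) : List (Int × Int) :=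
  (gfil S m).filter (fun e => decide (s ≤ e.1)) ++ (gfil S m).filter (fun e => decide (e.1 < s))

def bLevels (S : List (Int × Int)) (vs : List Int) (s : Int) : List Int :=
  match vs with
  | [] => []
  | v :: vt =>
    let g := (S.filter (fun e => e.2 == v)).map (fun e => e.1)
    let w := g.filter (fun i => decide (s ≤ i)) ++ g.filter (fun i => decide (i < s))
    w ++ bLevels S vt (PySem.List.pyGetD w (-1) 0 + 1)

-- max lemmas
theorem foldl_max_le (t : List (Int × Int)) (i : Int) :
    i ≤ t.foldl (fun acc e => max acc e.2) i ∧
    ∀ e ∈ t, e.2 ≤ t.foldl (fun acc e => max acc e.2) i := by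
  induction t generalizing i with
  | nil => simp
  | cons z t ih =>
    obtain ⟨h1, h2⟩ := ih (max i z.2)
    refine ⟨le_trans (le_max_left _ _) h1, ?_⟩
    intro e he
    rcases List.mem_cons.1 he with rfl | he
    · exact le_trans (le_max_right _ _) h1
    · exact h2 e he

theorem foldl_max_attained (t : List (Int × Int)) (i : Int) :
    t.foldl (fun acc e => max acc e.2) i = i ∨
    ∃ e ∈ t, t.foldl (fun acc e => max acc e.2) i = e.2 := by
  induction t generalizing i with
  | nil => simp
  | cons z t ih =>
    rcases ih (max i z.2) with h | ⟨e, he, h⟩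
    · rcases max_cases i z.2 with ⟨hm, _⟩ | ⟨hm, _⟩
      · left; simpa [hm] using h
      · right; exact ⟨z, List.mem_cons_self .., by simpa [hm] using h⟩
    · right; exact ⟨e, List.mem_cons_of_mem _ he, h⟩

theorem qmax_le (q : List (Int × Int)) (e : Int × Int) (he : e ∈ q) : e.2 ≤ qmaxL q := by
  match q with
  | [] => cases he
  | y :: t =>
    rcases List.mem_cons.1 he with rfl | he
    · exact (foldl_max_le t e.2).1
    · exact (foldl_max_le t y.2).2 e he

theorem qmax_eq (A B : List (Int × Int)) (x : Int × Int)
    (hA : ∀ e ∈ A, e.2 < x.2) (hB : ∀ e ∈ B, e.2 ≤ x.2) : qmaxL (A ++ x :: B) = x.2 := by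
  have hub : ∀ e ∈ A ++ x :: B, e.2 ≤ x.2 := by
    intro e he
    rcases List.mem_append.1 he with h | h
    · exact le_of_lt (hA e h)
    · rcases List.mem_cons.1 h with rfl | h
      · exact le_refl _
      · exact hB e h
  have hx : x ∈ A ++ x :: B := List.mem_append.2 (Or.inr (List.mem_cons_self ..))
  have h1 : x.2 ≤ qmaxL (A ++ x :: B) := qmax_le _ _ hx
  have h2 : qmaxL (A ++ x :: B) ≤ x.2 := by
    rcases hq : A ++ x :: B with _ | ⟨y, t⟩
    · simp at hq
    · rcases foldl_max_attained t y.2 with h | ⟨e, he, h⟩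
      · have : y ∈ A ++ x :: B := by rw [hq]; exact List.mem_cons_self ..
        simpa [qmaxL, h] using hub y this
      · have : e ∈ A ++ x :: B := by rw [hq]; exact List.mem_cons_of_mem _ he
        simpa [qmaxL, h] using hub e this
  omega

theorem takeWhile_middle {α : Type} (p : α → Bool) (A B : List α) (x : α)
    (hA : ∀ e ∈ A, p e = true) (hx : p x = false) :
    (A ++ x :: B).takeWhile p = A ∧ (A ++ x :: B).dropWhile p = x :: B := by
  induction A with
  | nil => simp [hx]
  | cons a A ih =>
    have ha : p a = true := hA a (List.mem_cons_self ..)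
    obtain ⟨h1, h2⟩ := ih (fun e he => hA e (List.mem_cons_of_mem _ he))
    simp [ha, h1, h2]

-- the split step of cpoQ
theorem cpoQ_split (A B : List (Int × Int)) (x : Int × Int)
    (hA : ∀ e ∈ A, e.2 < x.2) (hB : ∀ e ∈ B, e.2 ≤ x.2) :
    cpoQ (A ++ x :: B) = x.1 :: cpoQ (B ++ A) := by
  have hm : qmaxL (A ++ x :: B) = x.2 := qmax_eq A B x hA hB
  have hAp : ∀ e ∈ A, (decide (e.2 < qmaxL (A ++ x :: B))) = true :=
    fun e he => decide_eq_true (by rw [hm]; exact hA e he)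
  have hxp : (decide (x.2 < qmaxL (A ++ x :: B))) = false := by rw [hm]; simp
  obtain ⟨ht, hd⟩ := takeWhile_middle (fun e => decide (e.2 < qmaxL (A ++ x :: B))) A B x hAp hxp
  rw [cpoQ.eq_def]
  split
  · rename_i heq
    rw [hd] at heq; cases heq
  · rename_i x' b heq
    rw [hd] at heq
    injection heq with h1 h2
    subst h1; subst h2
    rw [ht]

theorem qmax_attained (y : Int × Int) (t : List (Int × Int)) :
    ∃ e ∈ y :: t, e.2 = qmaxL (y :: t) := by
  rcases foldl_max_attained t y.2 with h | ⟨e, he, h⟩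
  · exact ⟨y, List.mem_cons_self .., by simp [qmaxL, h]⟩
  · exact ⟨e, List.mem_cons_of_mem _ he, by simp [qmaxL, h]⟩

theorem dropWhile_head_false {α : Type} (p : α → Bool) :
    ∀ (l : List α) (x : α) (b : List α), l.dropWhile p = x :: b → p x = false := by
  intro l
  induction l with
  | nil => intro x b h; cases h
  | cons a l ih =>
    intro x b h
    rw [List.dropWhile_cons] at h
    by_cases hpa : p a = true
    · rw [if_pos hpa] at h; exact ih x b h
    · rw [if_neg hpa] at h
      injection h with h1 _
      subst h1
      exact Bool.eq_false_iff.2 hpa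

theorem cpoQ_struct (q : List (Int × Int)) (hq : q ≠ []) :
    ∃ tw x b, q = tw ++ x :: b ∧ (∀ e ∈ tw, e.2 < x.2) ∧ (∀ e ∈ b, e.2 ≤ x.2) ∧
      tw = q.takeWhile (fun e => decide (e.2 < qmaxL q)) := by
  obtain ⟨y, t, rfl⟩ := List.exists_cons_of_ne_nil hq
  have hne : (y :: t).dropWhile (fun e => decide (e.2 < qmaxL (y :: t))) ≠ [] := by
    intro h0
    rw [List.dropWhile_eq_nil_iff] at h0
    obtain ⟨e, he, hee⟩ := qmax_attained y t
    have := h0 e he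
    simp at this
    omega
  obtain ⟨x, b, hd⟩ := List.exists_cons_of_ne_nil hne
  have hsplit := List.takeWhile_append_dropWhile
    (p := fun e => decide (e.2 < qmaxL (y :: t))) (l := y :: t)
  rw [hd] at hsplit
  have hxq : x ∈ y :: t := by
    rw [← hsplit]; exact List.mem_append.2 (Or.inr (List.mem_cons_self ..))
  have hpx : (decide (x.2 < qmaxL (y :: t))) = false := dropWhile_head_false _ _ x b hd
  have hx2 : x.2 = qmaxL (y :: t) := by
    have h1 := qmax_le _ x hxq
    have h2 : ¬ x.2 < qmaxL (y :: t) := of_decide_eq_false hpx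
    omega
  refine ⟨(y :: t).takeWhile (fun e => decide (e.2 < qmaxL (y :: t))), x, b,
    hsplit.symm, ?_, ?_, rfl⟩
  · intro e he
    have := List.mem_takeWhile_imp he
    simp at this
    omega
  · intro e he
    have heq : e ∈ y :: t := by
      rw [← hsplit]
      exact List.mem_append.2 (Or.inr (List.mem_cons_of_mem _ he))
    rw [hx2]
    exact qmax_le _ e heq

-- A-port jumps over a block of rotations and one pop
theorem asim_jump (A : List (Int × Int)) (x : Int × Int) :
    ∀ (B : List (Int × Int)) (res : List Int),
    (∀ e ∈ A, e.2 < x.2) → (∀ e ∈ B, e.2 ≤ x.2) →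
    asimLoop (A ++ x :: B) res = asimLoop (B ++ A) (res ++ [x.1]) := by
  induction A with
  | nil =>
    intro B res _ hB
    rcases x with ⟨x1, x2⟩
    have hno : (B.any fun e => decide (x2 < e.2)) = false := by
      rw [Bool.eq_false_iff]
      intro hc
      obtain ⟨e, he, hpe⟩ := List.any_eq_true.1 hc
      have h1 := hB e he
      have h2 : x2 < e.2 := of_decide_eq_true hpe
      simp at h1
      omega
    rw [List.nil_append, List.append_nil, asimLoop.eq_def]
    simp [hno]
  | cons a A ih =>
    intro B res hA hB
    rcases a with ⟨a1, a2⟩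
    have hyes : ((A ++ x :: B).any fun e => decide (a2 < e.2)) = true := by
      refine List.any_eq_true.2 ⟨x, List.mem_append.2 (Or.inr (List.mem_cons_self ..)), ?_⟩
      exact decide_eq_true (hA (a1, a2) (List.mem_cons_self ..))
    rw [List.cons_append, asimLoop.eq_def]
    simp only [hyes, dite_true]
    have hstep : (A ++ x :: B) ++ [(a1, a2)] = A ++ x :: (B ++ [(a1, a2)]) := by
      simp [List.append_assoc]
    rw [hstep, ih (B ++ [(a1, a2)]) res
      (fun e he => hA e (List.mem_cons_of_mem _ he))
      (fun e he => by
        rcases List.mem_append.1 he with h | h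
        · exact hB e h
        · rcases List.mem_singleton.1 h with rfl
          exact le_of_lt (hA (a1, a2) (List.mem_cons_self ..)))]
    congr 1
    simp [List.append_assoc]

theorem asim_cpoQ : ∀ (n : Nat) (q : List (Int × Int)), q.length ≤ n →
    ∀ res, asimLoop q res = res ++ cpoQ q := by
  intro n
  induction n with
  | zero =>
    intro q hq res
    have : q = [] := List.length_eq_zero_iff.1 (Nat.le_zero.1 hq)
    subst this
    rw [asimLoop.eq_def, cpoQ.eq_def]
    simp
  | succ n ih =>
    intro q hq res
    rcases q with _ | ⟨y, t⟩
    · rw [asimLoop.eq_def, cpoQ.eq_def]; simp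
    · obtain ⟨tw, x, b, hsplit, hA, hB, -⟩ := cpoQ_struct (y :: t) (by simp)
      rw [hsplit, asim_jump tw x b res hA hB, cpoQ_split tw b x hA hB]
      have hlen : (b ++ tw).length ≤ n := by
        have := congrArg List.length hsplit
        simp at this hq ⊢
        omega
      rw [ih (b ++ tw) hlen (res ++ [x.1])]
      simp

theorem cpoQ_perm : ∀ (n : Nat) (q : List (Int × Int)), q.length ≤ n →
    (cpoQ q).Perm (q.map (fun e => e.1)) := by
  intro n
  induction n with
  | zero =>
    intro q hq
    have : q = [] := List.length_eq_zero_iff.1 (Nat.le_zero.1 hq)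
    subst this
    rw [cpoQ.eq_def]
    simp
  | succ n ih =>
    intro q hq
    rcases q with _ | ⟨y, t⟩
    · rw [cpoQ.eq_def]; simp
    · obtain ⟨tw, x, b, hsplit, hA, hB, -⟩ := cpoQ_struct (y :: t) (by simp)
      rw [hsplit, cpoQ_split tw b x hA hB]
      have hlen : (b ++ tw).length ≤ n := by
        have := congrArg List.length hsplit
        simp at this hq ⊢
        omega
      have hperm := ih (b ++ tw) hlen
      refine (hperm.cons x.1).trans ?_
      rw [List.map_append]
      refine (List.Perm.cons x.1 List.perm_append_comm).trans ?_
      have h2 : (tw ++ x :: b).map (fun e => e.1) =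
          (tw.map (fun e => e.1)) ++ x.1 :: (b.map (fun e => e.1)) := by simp
      rw [h2]
      exact List.perm_middle.symm

-- sorted-by-index structural lemmas
theorem sidx_inj (S : List (Int × Int)) (hs : sidx S) {e f : Int × Int}
    (he : e ∈ S) (hf : f ∈ S) (h : e.1 = f.1) : e = f := by
  induction S with
  | nil => cases he
  | cons a S ih =>
    rcases List.pairwise_cons.1 hs with ⟨ha, hS⟩
    rcases List.mem_cons.1 he with he1 | he1
    · rcases List.mem_cons.1 hf with hf1 | hf1
      · rw [he1, hf1]
      · exfalso; rw [he1] at h; have := ha f hf1; omega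
    · rcases List.mem_cons.1 hf with hf1 | hf1
      · exfalso; rw [hf1] at h; have := ha e he1; omega
      · exact ih hS he1 hf1

theorem sidx_split (S : List (Int × Int)) (x : Int × Int) (hs : sidx S) (hx : x ∈ S) :
    S = S.filter (fun e => decide (e.1 < x.1)) ++ x :: S.filter (fun e => decide (x.1 < e.1)) := by
  induction S with
  | nil => cases hx
  | cons a S ih =>
    rcases List.pairwise_cons.1 hs with ⟨ha, hS⟩
    rcases List.mem_cons.1 hx with hx1 | hx1
    · subst hx1
      have t1 : S.filter (fun e => decide (e.1 < x.1)) = [] :=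
        List.filter_eq_nil_iff.2 (fun e he => by simpa using not_lt.2 (le_of_lt (ha e he)))
      have t2 : S.filter (fun e => decide (x.1 < e.1)) = S :=
        List.filter_eq_self.2 (fun e he => by simpa using ha e he)
      simp [t1, t2]
    · have hax : a.1 < x.1 := ha x hx1
      have hax2 : ¬ x.1 < a.1 := by omega
      simp only [List.filter_cons, hax, hax2, decide_true, decide_false, if_true,
        List.cons_append, List.cons.injEq, true_and]
      exact ih hS hx1

theorem sidx_tsplit (S : List (Int × Int)) (p : Int × Int → Bool) (t : Int) (hs : sidx S) :
    S.filter p = S.filter (fun e => p e && decide (e.1 < t)) ++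
      S.filter (fun e => p e && decide (t ≤ e.1)) := by
  induction S with
  | nil => simp
  | cons a S ih =>
    rcases List.pairwise_cons.1 hs with ⟨ha, hS⟩
    by_cases hat : a.1 < t
    · simp only [List.filter_cons, hat, decide_true, Bool.and_true,
        show decide (t ≤ a.1) = false from decide_eq_false (by omega), Bool.and_false]
      cases hpa : p a <;> simp [ih hS]
    · have t1 : (a :: S).filter (fun e => p e && decide (e.1 < t)) = [] := by
        refine List.filter_eq_nil_iff.2 (fun e he => ?_)
        rcases List.mem_cons.1 he with rfl | he
        · simp [hat]
        · have : t ≤ a.1 := not_lt.1 hat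
          have : ¬ e.1 < t := by have := ha e he; omega
          simp [this]
      have t2 : S.filter (fun e => p e && decide (t ≤ e.1)) = S.filter p :=
        List.filter_congr (fun e he => by
          have h1 : t ≤ e.1 := by have := ha e he; omega
          simp [h1])
      rw [t1, List.nil_append, List.filter_cons, List.filter_cons, t2]
      have : decide (t ≤ a.1) = true := decide_eq_true (not_lt.1 hat)
      simp [this]

-- the geometric step on the queue side
theorem step_main (S : List (Int × Int)) (s m : Int) (x : Int × Int) (wT : List (Int × Int))
    (hs : sidx S) (hmax : ∀ e ∈ S, e.2 ≤ m) (hw : wPairs S m s = x :: wT) :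
    cpoQ (rotQ S s) =
      x.1 :: cpoQ (rotQ (S.filter (fun e => decide (e.1 ≠ x.1))) (x.1 + 1)) := by
  have hxG : x ∈ gfil S m := by
    have : x ∈ wPairs S m s := by rw [hw]; exact List.mem_cons_self ..
    rcases List.mem_append.1 this with h | h
    · exact (List.mem_filter.1 h).1
    · exact (List.mem_filter.1 h).1
  have hxS : x ∈ S := (List.mem_filter.1 hxG).1
  have hxm : x.2 = m := by
    have := (List.mem_filter.1 hxG).2
    simpa using this
  have hrot' : rotQ (S.filter (fun e => decide (e.1 ≠ x.1))) (x.1 + 1) =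
      S.filter (fun e => decide (x.1 < e.1)) ++ S.filter (fun e => decide (e.1 < x.1)) := by
    unfold rotQ
    rw [List.filter_filter, List.filter_filter]
    congr 1
    · refine List.filter_congr (fun e he => ?_)
      rw [← Bool.decide_and, decide_eq_decide]
      omega
    · refine List.filter_congr (fun e he => ?_)
      rw [← Bool.decide_and, decide_eq_decide]
      omega
  rw [hrot']
  unfold wPairs at hw
  cases hGge : (gfil S m).filter (fun e => decide (s ≤ e.1)) with
  | cons g gs =>
    -- some max-priority element sits at or after s; x is the first of them
    rw [hGge, List.cons_append] at hw
    have hg : g = x := by injection hw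
    rw [hg] at hGge
    have hsx : s ≤ x.1 := by
      have : x ∈ (gfil S m).filter (fun e => decide (s ≤ e.1)) := by
        rw [hGge]; exact List.mem_cons_self ..
      simpa using (List.mem_filter.1 this).2
    have hPc1 : ∀ e ∈ S, e.2 = m → s ≤ e.1 → x.1 ≤ e.1 := by
      intro e heS hem hse
      have heG : e ∈ (gfil S m).filter (fun e => decide (s ≤ e.1)) := by
        refine List.mem_filter.2 ⟨List.mem_filter.2 ⟨heS, by simpa using hem⟩, by simpa using hse⟩
      rw [hGge] at heG
      rcases List.mem_cons.1 heG with rfl | heG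
      · exact le_refl _
      · have hp : List.Pairwise (fun e f : Int × Int => e.1 < f.1)
            ((gfil S m).filter (fun e => decide (s ≤ e.1))) :=
          List.Pairwise.filter _ (List.Pairwise.filter _ hs)
        rw [hGge] at hp
        exact le_of_lt ((List.pairwise_cons.1 hp).1 e heG)
    have h3 : S.filter (fun e => decide (x.1 < e.1) && decide (s ≤ e.1)) =
        S.filter (fun e => decide (x.1 < e.1)) := by
      refine List.filter_congr (fun e he => ?_)
      rw [← Bool.decide_and, decide_eq_decide]
      omega
    have hFge : S.filter (fun e => decide (s ≤ e.1)) =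
        S.filter (fun e => decide (e.1 < x.1) && decide (s ≤ e.1)) ++
          x :: S.filter (fun e => decide (x.1 < e.1)) := by
      have hsub := sidx_split (S.filter (fun e => decide (s ≤ e.1))) x
        (List.Pairwise.filter _ hs) (List.mem_filter.2 ⟨hxS, by simpa using hsx⟩)
      rw [List.filter_filter, List.filter_filter] at hsub
      rw [hsub, h3]
    have hrotS : rotQ S s =
        S.filter (fun e => decide (e.1 < x.1) && decide (s ≤ e.1)) ++
          x :: (S.filter (fun e => decide (x.1 < e.1)) ++
            S.filter (fun e => decide (e.1 < s))) := by
      unfold rotQ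
      rw [hFge]
      simp [List.append_assoc]
    have hA : ∀ e ∈ S.filter (fun e => decide (e.1 < x.1) && decide (s ≤ e.1)),
        e.2 < x.2 := by
      intro e he
      obtain ⟨heS, hp⟩ := List.mem_filter.1 he
      simp only [Bool.and_eq_true, decide_eq_true_eq] at hp
      rcases eq_or_lt_of_le (hmax e heS) with heq | hlt
      · exfalso
        have := hPc1 e heS heq hp.2
        omega
      · omega
    have hB : ∀ e ∈ S.filter (fun e => decide (x.1 < e.1)) ++
        S.filter (fun e => decide (e.1 < s)), e.2 ≤ x.2 := by
      intro e he
      rw [hxm]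
      rcases List.mem_append.1 he with h | h
      · exact hmax e (List.mem_filter.1 h).1
      · exact hmax e (List.mem_filter.1 h).1
    rw [hrotS, cpoQ_split _ _ x hA hB]
    have hts := sidx_tsplit S (fun e => decide (e.1 < x.1)) s hs
    have h1 : S.filter (fun e => decide (e.1 < x.1) && decide (e.1 < s)) =
        S.filter (fun e => decide (e.1 < s)) := by
      refine List.filter_congr (fun e he => ?_)
      rw [← Bool.decide_and, decide_eq_decide]
      omega
    have hlist : (S.filter (fun e => decide (x.1 < e.1)) ++
          S.filter (fun e => decide (e.1 < s))) ++
          S.filter (fun e => decide (e.1 < x.1) && decide (s ≤ e.1)) =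
        S.filter (fun e => decide (x.1 < e.1)) ++
          S.filter (fun e => decide (e.1 < x.1)) := by
      rw [List.append_assoc]
      congr 1
      rw [hts, h1]
    rw [hlist]
  | nil =>
    -- no max-priority element at or after s; x is the overall first max element
    rw [hGge, List.nil_append] at hw
    have hnot : ∀ e ∈ S, e.2 = m → e.1 < s := by
      intro e heS hem
      have := List.filter_eq_nil_iff.1 hGge e
        (List.mem_filter.2 ⟨heS, by simpa using hem⟩)
      simpa using this
    have hxlt : x.1 < s := hnot x hxS hxm
    have hGall : (gfil S m).filter (fun e => decide (e.1 < s)) = gfil S m := by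
      refine List.filter_eq_self.2 (fun e he => ?_)
      have h1 := (List.mem_filter.1 he).1
      have h2 : e.2 = m := by simpa using (List.mem_filter.1 he).2
      simpa using hnot e h1 h2
    have hPmin : ∀ e ∈ S, e.2 = m → x.1 ≤ e.1 := by
      intro e heS hem
      have heG : e ∈ gfil S m := List.mem_filter.2 ⟨heS, by simpa using hem⟩
      rw [← hGall, hw] at heG
      rcases List.mem_cons.1 heG with rfl | heG
      · exact le_refl _
      · have hp : List.Pairwise (fun e f : Int × Int => e.1 < f.1)
            ((gfil S m).filter (fun e => decide (e.1 < s))) :=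
          List.Pairwise.filter _ (List.Pairwise.filter _ hs)
        rw [hw] at hp
        exact le_of_lt ((List.pairwise_cons.1 hp).1 e heG)
    have h3 : S.filter (fun e => decide (e.1 < x.1) && decide (e.1 < s)) =
        S.filter (fun e => decide (e.1 < x.1)) := by
      refine List.filter_congr (fun e he => ?_)
      rw [← Bool.decide_and, decide_eq_decide]
      omega
    have hFlt : S.filter (fun e => decide (e.1 < s)) =
        S.filter (fun e => decide (e.1 < x.1)) ++
          x :: S.filter (fun e => decide (x.1 < e.1) && decide (e.1 < s)) := by
      have hsub := sidx_split (S.filter (fun e => decide (e.1 < s))) x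
        (List.Pairwise.filter _ hs) (List.mem_filter.2 ⟨hxS, by simpa using hxlt⟩)
      rw [List.filter_filter, List.filter_filter] at hsub
      rw [hsub, h3]
    have hrotS : rotQ S s =
        (S.filter (fun e => decide (s ≤ e.1)) ++
          S.filter (fun e => decide (e.1 < x.1))) ++
          x :: S.filter (fun e => decide (x.1 < e.1) && decide (e.1 < s)) := by
      unfold rotQ
      rw [hFlt]
      simp [List.append_assoc]
    have hA : ∀ e ∈ S.filter (fun e => decide (s ≤ e.1)) ++
        S.filter (fun e => decide (e.1 < x.1)), e.2 < x.2 := by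
      intro e he
      rw [hxm]
      rcases List.mem_append.1 he with h | h
      · obtain ⟨heS, hp⟩ := List.mem_filter.1 h
        simp only [decide_eq_true_eq] at hp
        rcases eq_or_lt_of_le (hmax e heS) with heq | hlt
        · exfalso
          have := hnot e heS heq
          omega
        · exact hlt
      · obtain ⟨heS, hp⟩ := List.mem_filter.1 h
        simp only [decide_eq_true_eq] at hp
        rcases eq_or_lt_of_le (hmax e heS) with heq | hlt
        · exfalso
          have := hPmin e heS heq
          omega
        · exact hlt
    have hB : ∀ e ∈ S.filter (fun e => decide (x.1 < e.1) && decide (e.1 < s)),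
        e.2 ≤ x.2 := by
      intro e he
      rw [hxm]
      exact hmax e (List.mem_filter.1 he).1
    rw [hrotS, cpoQ_split _ _ x hA hB]
    have hts := sidx_tsplit S (fun e => decide (x.1 < e.1)) s hs
    have h1 : S.filter (fun e => decide (x.1 < e.1) && decide (s ≤ e.1)) =
        S.filter (fun e => decide (s ≤ e.1)) := by
      refine List.filter_congr (fun e he => ?_)
      rw [← Bool.decide_and, decide_eq_decide]
      omega
    have hlist : S.filter (fun e => decide (x.1 < e.1) && decide (e.1 < s)) ++
          (S.filter (fun e => decide (s ≤ e.1)) ++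
            S.filter (fun e => decide (e.1 < x.1))) =
        S.filter (fun e => decide (x.1 < e.1)) ++
          S.filter (fun e => decide (e.1 < x.1)) := by
      rw [← List.append_assoc]
      congr 1
      rw [hts, h1]
    rw [hlist]

theorem bLevels_congr (S S' : List (Int × Int)) (vt : List Int)
    (hf : ∀ v ∈ vt, S'.filter (fun e => e.2 == v) = S.filter (fun e => e.2 == v)) :
    ∀ s, bLevels S' vt s = bLevels S vt s := by
  induction vt with
  | nil => intro s; rfl
  | cons v vt ih =>
    intro s
    have hv := hf v (List.mem_cons_self ..)
    simp only [bLevels, hv]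
    rw [ih (fun u hu => hf u (List.mem_cons_of_mem _ hu))]

-- the step on the level-pass side (incorporating erase)
theorem wPairs_step (S : List (Int × Int)) (s m : Int) (x : Int × Int) (wT : List (Int × Int))
    (hs : sidx S) (hw : wPairs S m s = x :: wT) :
    wPairs (S.filter (fun e => decide (e.1 ≠ x.1))) m (x.1 + 1) = wT := by
  have hGp : List.Pairwise (fun e f : Int × Int => e.1 < f.1) (gfil S m) :=
    List.Pairwise.filter _ hs
  have hcomm : gfil (S.filter (fun e => decide (e.1 ≠ x.1))) m =
      (gfil S m).filter (fun e => decide (e.1 ≠ x.1)) := by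
    unfold gfil
    rw [List.filter_filter, List.filter_filter]
    exact List.filter_congr (fun e _ => Bool.and_comm _ _)
  have hxG : x ∈ gfil S m := by
    have : x ∈ wPairs S m s := by rw [hw]; exact List.mem_cons_self ..
    rcases List.mem_append.1 this with h | h
    · exact (List.mem_filter.1 h).1
    · exact (List.mem_filter.1 h).1
  unfold wPairs
  rw [hcomm, List.filter_filter, List.filter_filter]
  have e1 : (gfil S m).filter (fun e => decide (x.1 + 1 ≤ e.1) && decide (e.1 ≠ x.1)) =
      (gfil S m).filter (fun e => decide (x.1 < e.1)) := by
    refine List.filter_congr (fun e _ => ?_)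
    rw [← Bool.decide_and, decide_eq_decide]
    omega
  have e2 : (gfil S m).filter (fun e => decide (e.1 < x.1 + 1) && decide (e.1 ≠ x.1)) =
      (gfil S m).filter (fun e => decide (e.1 < x.1)) := by
    refine List.filter_congr (fun e _ => ?_)
    rw [← Bool.decide_and, decide_eq_decide]
    omega
  rw [e1, e2]
  unfold wPairs at hw
  cases hGge : (gfil S m).filter (fun e => decide (s ≤ e.1)) with
  | cons g gs =>
    rw [hGge, List.cons_append] at hw
    have hg : g = x := by injection hw
    rw [hg] at hGge
    have hwT : gs ++ (gfil S m).filter (fun e => decide (e.1 < s)) = wT := by injection hw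
    have hsx : s ≤ x.1 := by
      have : x ∈ (gfil S m).filter (fun e => decide (s ≤ e.1)) := by
        rw [hGge]; exact List.mem_cons_self ..
      simpa using (List.mem_filter.1 this).2
    have hgsx : ∀ e ∈ gs, x.1 < e.1 := by
      have hp := List.Pairwise.filter (fun e => decide (s ≤ e.1)) hGp
      rw [hGge] at hp
      exact (List.pairwise_cons.1 hp).1
    -- first piece: the max elements strictly after x
    have p1 : (gfil S m).filter (fun e => decide (x.1 < e.1)) = gs := by
      have step1 : (gfil S m).filter (fun e => decide (x.1 < e.1)) =
          ((gfil S m).filter (fun e => decide (s ≤ e.1))).filter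
            (fun e => decide (x.1 < e.1)) := by
        rw [List.filter_filter]
        refine List.filter_congr (fun e _ => ?_)
        rw [← Bool.decide_and, decide_eq_decide]
        omega
      rw [step1, hGge, List.filter_cons]
      simp only [show decide (x.1 < x.1) = false by simp, if_neg, Bool.false_eq_true,
        not_false_iff]
      exact List.filter_eq_self.2 (fun e he => by simpa using hgsx e he)
    -- second piece: the max elements before x are exactly those before s
    have p2 : (gfil S m).filter (fun e => decide (e.1 < x.1)) =
        (gfil S m).filter (fun e => decide (e.1 < s)) := by
      refine List.filter_congr (fun e he => ?_)
      rw [decide_eq_decide]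
      constructor
      · intro hlt
        by_contra hns
        have : e ∈ (gfil S m).filter (fun e => decide (s ≤ e.1)) :=
          List.mem_filter.2 ⟨he, by simpa using not_lt.1 hns⟩
        rw [hGge] at this
        rcases List.mem_cons.1 this with rfl | hgs
        · omega
        · have := hgsx e hgs; omega
      · intro hlt; omega
    rw [p1, p2, hwT]
  | nil =>
    rw [hGge, List.nil_append] at hw
    have hGall : (gfil S m).filter (fun e => decide (e.1 < s)) = gfil S m := by
      refine List.filter_eq_self.2 (fun e he => ?_)
      have := List.filter_eq_nil_iff.1 hGge e he
      simpa using by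
        have h2 : ¬ s ≤ e.1 := by simpa using this
        omega
    have hG : gfil S m = x :: wT := by rw [← hGall, hw]
    have hwTx : ∀ e ∈ wT, x.1 < e.1 := by
      have hp := hGp
      rw [hG] at hp
      exact (List.pairwise_cons.1 hp).1
    have p1 : (gfil S m).filter (fun e => decide (x.1 < e.1)) = wT := by
      rw [hG, List.filter_cons]
      simp only [show decide (x.1 < x.1) = false by simp, if_neg, Bool.false_eq_true,
        not_false_iff]
      exact List.filter_eq_self.2 (fun e he => by simpa using hwTx e he)
    have p2 : (gfil S m).filter (fun e => decide (e.1 < x.1)) = [] := by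
      rw [hG]
      refine List.filter_eq_nil_iff.2 (fun e he => ?_)
      rcases List.mem_cons.1 he with rfl | he
      · simp
      · have := hwTx e he
        simp only [decide_eq_true_eq]
        omega
    rw [p1, p2, List.append_nil]

theorem length_filter_lt {α : Type} (p : α → Bool) (S : List α) (x : α)
    (hx : x ∈ S) (hp : p x = false) : (S.filter p).length < S.length := by
  induction S with
  | nil => cases hx
  | cons a S ih =>
    rw [List.filter_cons]
    rcases List.mem_cons.1 hx with rfl | hx
    · rw [if_neg (by simp [hp])]
      exact Nat.lt_succ_of_le (List.length_filter_le _ _)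
    · split_ifs with hpa
      · simpa using ih hx
      · simp only [List.length_cons]
        exact Nat.lt_succ_of_lt (ih hx)

theorem bLevels_cons (S : List (Int × Int)) (v : Int) (vt : List Int) (s : Int) :
    bLevels S (v :: vt) s =
      (wPairs S v s).map (fun e => e.1) ++
        bLevels S vt
          (PySem.List.pyGetD ((wPairs S v s).map (fun e => e.1)) (-1) 0 + 1) := by
  simp only [bLevels]
  unfold wPairs gfil
  rw [List.map_append, List.filter_map, List.filter_map]
  rfl

theorem pyGetD_last_cons (a : Int) (l : List Int) (h : l ≠ []) :
    PySem.List.pyGetD (a :: l) (-1) 0 = PySem.List.pyGetD l (-1) 0 := by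
  rw [PySem.List.pyGetD_neg_one _ _ (by simp), PySem.List.pyGetD_neg_one _ _ h]
  exact List.getLast_cons h

theorem main_bridge : ∀ (n : Nat) (S : List (Int × Int)) (vs : List Int) (s : Int),
    S.length ≤ n → sidx S → vs.Pairwise (· > ·) →
    (∀ v, v ∈ vs ↔ ∃ e ∈ S, e.2 = v) →
    cpoQ (rotQ S s) = bLevels S vs s := by
  intro n
  induction n with
  | zero =>
    intro S vs s hlen hs hvs hmem
    have hS : S = [] := List.length_eq_zero_iff.1 (Nat.le_zero.1 hlen)
    subst hS
    have hvs0 : vs = [] := by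
      cases vs with
      | nil => rfl
      | cons v vt =>
        obtain ⟨e, he, -⟩ := (hmem v).1 (List.mem_cons_self ..)
        cases he
    subst hvs0
    rw [cpoQ.eq_def]
    simp [rotQ, bLevels]
  | succ n ih =>
    intro S vs s hlen hs hvs hmem
    by_cases hSnil : S = []
    · subst hSnil
      have hvs0 : vs = [] := by
        cases vs with
        | nil => rfl
        | cons v vt =>
          obtain ⟨e, he, -⟩ := (hmem v).1 (List.mem_cons_self ..)
          cases he
      subst hvs0
      rw [cpoQ.eq_def]
      simp [rotQ, bLevels]
    · obtain ⟨y0, hy0⟩ := List.exists_mem_of_ne_nil _ hSnil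
      cases vs with
      | nil =>
        exfalso
        have := (hmem y0.2).2 ⟨y0, hy0, rfl⟩
        cases this
      | cons m vt =>
        have hvt : vt.Pairwise (· > ·) := (List.pairwise_cons.1 hvs).2
        have hmax : ∀ e ∈ S, e.2 ≤ m := by
          intro e he
          have h2 : e.2 ∈ m :: vt := (hmem e.2).2 ⟨e, he, rfl⟩
          rcases List.mem_cons.1 h2 with h3 | h3
          · exact le_of_eq h3
          · exact le_of_lt ((List.pairwise_cons.1 hvs).1 _ h3)
        obtain ⟨e0, he0S, he0m⟩ := (hmem m).1 (List.mem_cons_self ..)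
        have he0G : e0 ∈ gfil S m := List.mem_filter.2 ⟨he0S, by simpa using he0m⟩
        have hwne : wPairs S m s ≠ [] := by
          intro h0
          unfold wPairs at h0
          rcases List.append_eq_nil_iff.1 h0 with ⟨h1, h2⟩
          by_cases hcase : s ≤ e0.1
          · exact absurd (List.mem_filter.2 ⟨he0G, decide_eq_true hcase⟩)
              (by rw [h1]; simp)
          · exact absurd (List.mem_filter.2 ⟨he0G, decide_eq_true (by omega : e0.1 < s)⟩)
              (by rw [h2]; simp)
        obtain ⟨x, wT, hwp⟩ := List.exists_cons_of_ne_nil hwne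
        have hxG : x ∈ gfil S m := by
          have hx0 : x ∈ wPairs S m s := by rw [hwp]; exact List.mem_cons_self ..
          unfold wPairs at hx0
          rcases List.mem_append.1 hx0 with h | h
          · exact (List.mem_filter.1 h).1
          · exact (List.mem_filter.1 h).1
        have hxS : x ∈ S := (List.mem_filter.1 hxG).1
        have hxm : x.2 = m := by simpa using (List.mem_filter.1 hxG).2
        have hperm : (wPairs S m s).Perm (gfil S m) := by
          unfold wPairs
          have hneg : (gfil S m).filter (fun e => decide (e.1 < s)) =
              (gfil S m).filter (fun e => !decide (s ≤ e.1)) :=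
            List.filter_congr (fun e _ => by
              by_cases h : s ≤ e.1
              · simp [h, show ¬ e.1 < s by omega]
              · simp [h, show e.1 < s by omega])
          rw [hneg]
          exact List.filter_append_perm _ _
        have hlen' : (S.filter (fun e => decide (e.1 ≠ x.1))).length ≤ n := by
          have := length_filter_lt (fun e => decide (e.1 ≠ x.1)) S x hxS (by simp)
          omega
        have hs' : sidx (S.filter (fun e => decide (e.1 ≠ x.1))) :=
          List.Pairwise.filter _ hs
        have hfilv : ∀ v ∈ vt,
            (S.filter (fun e => decide (e.1 ≠ x.1))).filter (fun e => e.2 == v) =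
              S.filter (fun e => e.2 == v) := by
          intro v hv
          have hvm : m > v := (List.pairwise_cons.1 hvs).1 v hv
          rw [List.filter_filter]
          refine List.filter_congr (fun e he => ?_)
          cases hev : (e.2 == v) with
          | false => simp
          | true =>
            have hev' : e.2 = v := by simpa using hev
            have hne : e.1 ≠ x.1 := by
              intro heq
              have hex := sidx_inj S hs he hxS heq
              rw [hex, hxm] at hev'
              omega
            simp [hne]
        have hmem_vt : ∀ v ∈ vt, ∃ e ∈ S.filter (fun e => decide (e.1 ≠ x.1)), e.2 = v := by
          intro v hv
          obtain ⟨e, heS, hev⟩ := (hmem v).1 (List.mem_cons_of_mem _ hv)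
          refine ⟨e, List.mem_filter.2 ⟨heS, ?_⟩, hev⟩
          simp only [decide_eq_true_eq]
          intro heq
          have hex := sidx_inj S hs heS hxS heq
          rw [hex, hxm] at hev
          have := (List.pairwise_cons.1 hvs).1 v hv
          omega
        have hmem_back : ∀ e ∈ S.filter (fun e => decide (e.1 ≠ x.1)), e.2 ∈ m :: vt :=
          fun e he => (hmem e.2).2 ⟨e, (List.mem_filter.1 he).1, rfl⟩
        have hLHS := step_main S s m x wT hs hmax hwp
        have hstep := wPairs_step S s m x wT hs hwp
        rw [bLevels_cons, hwp]
        cases wT with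
        | nil =>
          have hGx : gfil S m = [x] := by
            rw [hwp] at hperm
            exact List.perm_singleton.1 hperm.symm
          have hmem' : ∀ v, v ∈ vt ↔
              ∃ e ∈ S.filter (fun e => decide (e.1 ≠ x.1)), e.2 = v := by
            intro v
            constructor
            · exact hmem_vt v
            · rintro ⟨e, heS', hev⟩
              have h2 := hmem_back e heS'
              rcases List.mem_cons.1 h2 with h3 | h3
              · exfalso
                have heG : e ∈ gfil S m :=
                  List.mem_filter.2 ⟨(List.mem_filter.1 heS').1, by simpa using h3⟩
                rw [hGx] at heG
                have hex : e = x := List.mem_singleton.1 heG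
                have hfail := (List.mem_filter.1 heS').2
                rw [hex] at hfail
                simp at hfail
              · exact hev ▸ h3
          have hrec := ih (S.filter (fun e => decide (e.1 ≠ x.1))) vt (x.1 + 1)
            hlen' hs' hvt hmem'
          rw [hLHS, hrec, bLevels_congr S _ vt hfilv]
          simp [PySem.List.pyGetD_neg_one ([x.1]) 0 (by simp)]
        | cons w2 wTt =>
          have hmem'' : ∀ v, v ∈ m :: vt ↔
              ∃ e ∈ S.filter (fun e => decide (e.1 ≠ x.1)), e.2 = v := by
            intro v
            constructor
            · intro hv
              rcases List.mem_cons.1 hv with rfl | hv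
              · have hw2 : w2 ∈ wPairs (S.filter (fun e => decide (e.1 ≠ x.1))) v (x.1 + 1) := by
                  rw [hstep]; exact List.mem_cons_self ..
                unfold wPairs at hw2
                rcases List.mem_append.1 hw2 with h | h
                · obtain ⟨hg, -⟩ := List.mem_filter.1 h
                  obtain ⟨hS', hm'⟩ := List.mem_filter.1 hg
                  exact ⟨w2, hS', by simpa using hm'⟩
                · obtain ⟨hg, -⟩ := List.mem_filter.1 h
                  obtain ⟨hS', hm'⟩ := List.mem_filter.1 hg
                  exact ⟨w2, hS', by simpa using hm'⟩
              · exact hmem_vt v hv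
            · rintro ⟨e, heS', hev⟩
              exact hev ▸ hmem_back e heS'
          have hrec := ih (S.filter (fun e => decide (e.1 ≠ x.1))) (m :: vt) (x.1 + 1)
            hlen' hs' hvs hmem''
          rw [hLHS, hrec, bLevels_cons, hstep, bLevels_congr S _ vt hfilv]
          have hlast : PySem.List.pyGetD (((x :: w2 :: wTt).map (fun e => e.1))) (-1) 0 =
              PySem.List.pyGetD (((w2 :: wTt).map (fun e => e.1))) (-1) 0 := by
            rw [List.map_cons]
            exact pyGetD_last_cons _ _ (by simp)
          rw [hlast]
          simp

-- final answer loops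
theorem bFind_eq (location : Int) : ∀ (l : List Int) (i : Int),
    bFind location l i = if location ∈ l then i + (List.idxOf location l : Int) + 1 else 0 := by
  intro l
  induction l with
  | nil => simp [bFind]
  | cons a l ih =>
    intro i
    by_cases ha : a = location
    · subst ha
      simp [bFind, List.idxOf_cons_self]
    · have hne : (a == location) = false := beq_eq_false_iff_ne.2 ha
      rw [bFind, if_neg ha, ih]
      by_cases hm : location ∈ l
      · have : location ∈ a :: l := List.mem_cons_of_mem _ hm
        rw [if_pos hm, if_pos this]
        simp only [List.idxOf_cons, hne, cond_false]
        push_cast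
        omega
      · have : location ∉ a :: l := by simp [hm, Ne.symm ha]
        rw [if_neg hm, if_neg this]

theorem afold_eq (location : Int) (l : List Int) (hl : l.Nodup) :
    (PySem.List.pyRange 0 (l.length) 1).foldl
      (fun answer i => if location = PySem.List.pyGetD l i 0 then i + 1 else answer) 0 =
    bFind location l 0 := by
  have key : ∀ n : Nat, n ≤ l.length →
      (PySem.List.pyRange 0 (n : Int) 1).foldl
        (fun answer i => if location = PySem.List.pyGetD l i 0 then i + 1 else answer) 0 =
      if location ∈ l.take n then (List.idxOf location l : Int) + 1 else 0 := by
    intro n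
    induction n with
    | zero =>
      intro _
      rw [PySem.List.pyRange_one_eq_nil (by norm_num)]
      simp
    | succ n ihn =>
      intro hn
      have hlt : n < l.length := hn
      have hcast : ((n + 1 : Nat) : Int) = (n : Int) + 1 := by push_cast; ring
      rw [hcast, PySem.List.pyRange_one_succ_right (by positivity), List.foldl_append]
      simp only [List.foldl_cons, List.foldl_nil]
      rw [ihn (le_of_lt hlt), PySem.List.pyGetD_natCast, List.getD_eq_getElem l 0 hlt]
      have htake : l.take (n + 1) = l.take n ++ [l[n]] := by
        rw [List.take_add_one, List.getElem?_eq_getElem hlt]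
        rfl
      by_cases hloc : location = l[n]
      · rw [if_pos hloc]
        have hidx : List.idxOf location l = n := by rw [hloc]; exact hl.idxOf_getElem n hlt
        rw [if_pos (by rw [htake]; exact List.mem_append.2 (Or.inr (by simp [hloc]))), hidx]
      · rw [if_neg hloc]
        have hmemiff : (location ∈ l.take (n + 1)) ↔ (location ∈ l.take n) := by
          constructor
          · intro h
            rw [htake] at h
            rcases List.mem_append.1 h with h | h
            · exact h
            · exact absurd (List.mem_singleton.1 h) hloc
          · intro h
            rw [htake]
            exact List.mem_append.2 (Or.inl h)
        by_cases hm : location ∈ l.take n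
        · rw [if_pos hm, if_pos (hmemiff.2 hm)]
        · rw [if_neg hm, if_neg (fun hc => hm (hmemiff.1 hc))]
  have hfin := key l.length (le_refl _)
  rw [List.take_length] at hfin
  rw [hfin, bFind_eq]
  by_cases hm : location ∈ l
  · rw [if_pos hm, if_pos hm]; ring
  · rw [if_neg hm, if_neg hm]

-- ===== VERDICT (by name: the statement is the Claim_ definition above) =====
theorem solution_spec : Claim_equal_solution := by
  unfold Claim_equal_solution
  intro priorities location _
  unfold Spec_solution solution solution_alt
  dsimp only
  have hsS : sidx (PySem.List.enumerate priorities) :=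
    PySem.List.pairwise_lt_enumerate priorities 0
  have hidx0 : ∀ e ∈ PySem.List.enumerate priorities, 0 ≤ e.1 := by
    intro e he
    obtain ⟨k, hk, rfl⟩ := (PySem.List.mem_enumerate_iff priorities 0 e).1 he
    simp
  have hrot0 : rotQ (PySem.List.enumerate priorities) 0 = PySem.List.enumerate priorities := by
    unfold rotQ
    rw [List.filter_eq_self.2 (fun e he => decide_eq_true (hidx0 e he)),
      List.filter_eq_nil_iff.2 (fun e he => by
        have := hidx0 e he
        simp only [decide_eq_true_eq]
        omega),
      List.append_nil]
  have hvs_pair :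
      (PySem.List.sorted (PySem.Set.ofList priorities) (fun x => x) true).Pairwise (· > ·) := by
    have h1 := PySem.List.sorted_pairwise_rev (PySem.Set.ofList priorities) (fun x => x)
    have h2 : (PySem.List.sorted (PySem.Set.ofList priorities) (fun x => x) true).Nodup :=
      (PySem.List.sorted_perm (PySem.Set.ofList priorities) (fun x => x) true).nodup_iff.2
        (PySem.Set.nodup_ofList priorities)
    exact (h1.and h2).imp (fun h => by omega)
  have hvs_mem : ∀ v, v ∈ PySem.List.sorted (PySem.Set.ofList priorities) (fun x => x) true ↔
      ∃ e ∈ PySem.List.enumerate priorities, e.2 = v := by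
    intro v
    rw [PySem.List.mem_sorted, PySem.Set.mem_ofList]
    constructor
    · intro hv
      have : v ∈ (PySem.List.enumerate priorities).map (fun e => e.2) := by
        rw [PySem.List.map_snd_enumerate]
        exact hv
      obtain ⟨e, he, hev⟩ := List.mem_map.1 this
      exact ⟨e, he, hev⟩
    · rintro ⟨e, he, rfl⟩
      have : e.2 ∈ (PySem.List.enumerate priorities).map (fun e => e.2) :=
        List.mem_map.2 ⟨e, he, rfl⟩
      rwa [PySem.List.map_snd_enumerate] at this
  have horder : asimLoop (PySem.List.enumerate priorities) [] =
      bLevels (PySem.List.enumerate priorities)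
        (PySem.List.sorted (PySem.Set.ofList priorities) (fun x => x) true) 0 := by
    rw [asim_cpoQ (PySem.List.enumerate priorities).length _ (le_refl _) [], List.nil_append]
    calc cpoQ (PySem.List.enumerate priorities)
        = cpoQ (rotQ (PySem.List.enumerate priorities) 0) := by rw [hrot0]
      _ = _ := main_bridge (PySem.List.enumerate priorities).length _ _ 0
            (le_refl _) hsS hvs_pair hvs_mem
  have hfold : ∀ (vsl : List Int) (ord : List Int) (st : Int),
      (vsl.foldl (bStep priorities) (ord, st)).1 =
        ord ++ bLevels (PySem.List.enumerate priorities) vsl st := by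
    intro vsl
    induction vsl with
    | nil => intro ord st; simp [bLevels]
    | cons v vt ihv =>
      intro ord st
      rw [List.foldl_cons]
      have hbstep : bStep priorities (ord, st) v =
          (ord ++ ((((PySem.List.enumerate priorities).filter (fun ip => ip.2 == v)).map (fun ip => ip.1)).filter (fun i => decide (st ≤ i)) ++ (((PySem.List.enumerate priorities).filter (fun ip => ip.2 == v)).map (fun ip => ip.1)).filter (fun i => decide (i < st))), PySem.List.pyGetD ((((PySem.List.enumerate priorities).filter (fun ip => ip.2 == v)).map (fun ip => ip.1)).filter (fun i => decide (st ≤ i)) ++ (((PySem.List.enumerate priorities).filter (fun ip => ip.2 == v)).map (fun ip => ip.1)).filter (fun i => decide (i < st))) (-1) 0 + 1) := rfl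
      rw [hbstep, ihv]
      simp [bLevels, List.append_assoc]
  have hnodup : (asimLoop (PySem.List.enumerate priorities) []).Nodup := by
    rw [asim_cpoQ (PySem.List.enumerate priorities).length _ (le_refl _) [], List.nil_append]
    refine (cpoQ_perm (PySem.List.enumerate priorities).length _ (le_refl _)).nodup_iff.2 ?_
    rw [PySem.List.map_fst_enumerate]
    exact PySem.List.nodup_pyRange_one _ _
  rw [hfold _ [] 0, List.nil_append, ← horder]
  exact afold_eq location (asimLoop (PySem.List.enumerate priorities) []) hnodup
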